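-- pv_equiv track=rewrite | github.com/hagixxg28/uni_python | mmn13_206037574.py | sequence_counter
-- ===== SOURCE A (Python) =====
-- def sequence_counter(items: list[int], index: int = 0,
--                      longest_sequence: int = 1,
--                      current_sequence: int = 1) -> int:
--     """
--      Iterates on a list of integers and counts the highest sequence of
--      same numbers as described before.
--      The moment the sequence breaks it compares the current count to the longest thus in the end
--      returning the highest count.
--      :return:
--          int
--      """
--     if index == 0:
--         return sequence_counter(items=items, index=index + 1)
--
--     try:
--         if digit_checker(last_item=items[index - 1],
--                          current_item=items[index]):
--             current_sequence += 1
--         else: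
--             longest_sequence = max(longest_sequence, current_sequence)
--             current_sequence = 1
--
--     except IndexError:
--         return max(longest_sequence, current_sequence)
--
--     return sequence_counter(items=items,
--                             index=index + 1,
--                             longest_sequence=longest_sequence,
--                             current_sequence=current_sequence)
--
-- def digit_checker(last_item: int, current_item: int) -> bool:
--     """
--       Checks if the last digit of a certain number is equal
--       to the first digit of another number
--       :return:
--           bool
--       """
--     item_str = str(current_item)
--     last_item_str = str(last_item)
--     return last_item_str[-1] == item_str[0]
-- ===== SOURCE B (Python) =====
-- def sequence_counter(items, index=0, longest_sequence=1, current_sequence=1):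
--     if index == 0:
--         # a fresh scan: start comparing at position 1 with both counters at 1
--         index, longest_sequence, current_sequence = 1, 1, 1
--     longest, current = longest_sequence, current_sequence
--     for j in range(index, len(items)):
--         if str(items[j - 1])[-1] == str(items[j])[0]:
--             current += 1
--         else:
--             longest = max(longest, current)
--             current = 1
--     return max(longest, current)
-- ===== Notes on version B (the rewrite author's own statement) =====
-- stated objective: simpler
-- what changed: Replaced A's recursion with accumulator parameters and try/except IndexError control flow by a single iterative for-loop over the index range; Pre_ excludes negative start indices, where A's values come from Python's accidental negative-index wraparound in the recursion.
-- outside the precondition, e.g. on sequence_counter([5, 51], -1, 3, 3): A returns 2, B returns 4; on sequence_counter([5], -3, 7, 2): A returns 7, B raises IndexError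
import Mathlib
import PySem

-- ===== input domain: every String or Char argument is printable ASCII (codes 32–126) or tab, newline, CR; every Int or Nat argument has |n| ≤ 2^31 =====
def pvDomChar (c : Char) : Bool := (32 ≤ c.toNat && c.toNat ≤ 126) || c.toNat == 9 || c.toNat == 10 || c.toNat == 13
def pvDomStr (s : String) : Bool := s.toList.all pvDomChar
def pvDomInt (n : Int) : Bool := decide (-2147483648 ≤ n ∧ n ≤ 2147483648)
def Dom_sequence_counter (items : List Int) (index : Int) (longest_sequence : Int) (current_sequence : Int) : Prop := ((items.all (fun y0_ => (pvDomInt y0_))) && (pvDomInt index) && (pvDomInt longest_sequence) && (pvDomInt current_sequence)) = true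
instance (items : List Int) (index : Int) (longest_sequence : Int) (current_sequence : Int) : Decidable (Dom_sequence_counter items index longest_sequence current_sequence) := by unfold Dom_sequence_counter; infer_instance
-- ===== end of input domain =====

-- B replaces A's accumulator recursion + try/except with one iterative loop (objective: simpler).

-- ===== PORT A =====
-- str(last_item)[-1] == str(current_item)[0]; both strings are nonempty so the
-- Python indexings never raise, and Option equality on pyGet? is exact.
def digit_checker (last_item : Int) (current_item : Int) : Bool :=
  PySem.Str.pyGet? (PySem.Int.toStr last_item) (-1) == PySem.Str.pyGet? (PySem.Int.toStr current_item) 0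

-- termination helpers for the port's well-founded recursion (cited in decreasing_by)
lemma pv_dec_zero (xs : List Int) {i : Int} (h : i = 0) :
    (((xs.length : Int)) + 1 - (i + 1)).toNat < (((xs.length : Int)) + 1 - i).toNat := by
  subst h
  rw [zero_add, add_sub_cancel_right, sub_zero, Int.toNat_natCast,
    (by rw [Nat.cast_add, Nat.cast_one] : ((xs.length : Int) + 1) = ((xs.length + 1 : Nat) : Int)),
    Int.toNat_natCast]
  exact Nat.lt_succ_self _

lemma pv_dec_of_some {xs : List Int} {i x : Int} (h : PySem.List.pyGet? xs i = some x) :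
    (((xs.length : Int)) + 1 - (i + 1)).toNat < (((xs.length : Int)) + 1 - i).toNat := by
  have hin : PySem.Raise.InRange xs.length i := by
    by_contra hc
    rw [(PySem.List.pyGet?_eq_none_iff xs i).mpr hc] at h
    exact Option.some_ne_none x h.symm
  have h2 : i < (xs.length : Int) := hin.2
  rw [add_sub_add_right_eq_sub, add_sub_right_comm]
  have hd : (0 : Int) < (xs.length : Int) - i := sub_pos.mpr h2
  exact (Int.toNat_lt_toNat (lt_trans hd (lt_add_one _))).mpr (lt_add_one _)

-- literal port of A; items[index-1] / items[index] via pyGet?, the `| _, _` arm is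
-- the `except IndexError` branch (either lookup raising returns max(l, c)).
def sequence_counter (items : List Int) (index : Int) (longest_sequence : Int) (current_sequence : Int) : Int :=
  if h0 : index = 0 then
    sequence_counter items (index + 1) 1 1
  else
    match h1 : PySem.List.pyGet? items (index - 1), h2 : PySem.List.pyGet? items index with
    | some last, some cur =>
      if digit_checker last cur then
        sequence_counter items (index + 1) longest_sequence (current_sequence + 1)
      else
        sequence_counter items (index + 1) (max longest_sequence current_sequence) 1
    | _, _ => max longest_sequence current_sequence
termination_by ((items.length : Int) + 1 - index).toNat
decreasing_by
  · exact pv_dec_zero items h0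
  · exact pv_dec_of_some h2
  · exact pv_dec_of_some h2

-- ===== PORT B =====
-- the loop-body comparison of Source B: str(items[j-1])[-1] == str(items[j])[0]
-- (only evaluated with 1 ≤ j < len items, where getD is exact)
def alt_match (items : List Int) (j : Int) : Bool :=
  PySem.Str.pyGet? (PySem.Int.toStr (items.getD (j - 1).toNat 0)) (-1)
    == PySem.Str.pyGet? (PySem.Int.toStr (items.getD j.toNat 0)) 0

-- Source B's for-loop over range(start, n) with state (longest, current), then the final max
def alt_loop (items : List Int) (start : Int) (l : Int) (c : Int) : Int :=
  let lc := (PySem.List.pyRange start (items.length : Int) 1).foldl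
    (fun lc j => if alt_match items j then (lc.1, lc.2 + 1) else (max lc.1 lc.2, 1)) (l, c)
  max lc.1 lc.2

def sequence_counter_alt (items : List Int) (index : Int) (longest_sequence : Int) (current_sequence : Int) : Int :=
  if index = 0 then alt_loop items 1 1 1
  else alt_loop items index longest_sequence current_sequence

-- ===== PRECONDITION & SPEC =====
-- Pre_ excludes negative start indices: there A's result is an accident of Python's
-- negative-index wraparound inside the recursion, and B's plain loop raises IndexError
-- or scans different pairs on such inputs.
def Pre_sequence_counter (items : List Int) (index : Int) (longest_sequence : Int) (current_sequence : Int) : Prop :=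
  0 ≤ index
instance (items : List Int) (index : Int) (longest_sequence : Int) (current_sequence : Int) : Decidable (Pre_sequence_counter items index longest_sequence current_sequence) := by unfold Pre_sequence_counter; infer_instance

def pvWitness_sequence_counter : List Int × Int × Int × Int := ([11, 12, 21], 0, 1, 1)

def Spec_sequence_counter (items : List Int) (index : Int) (longest_sequence : Int) (current_sequence : Int) (out : Int) : Prop := out = sequence_counter_alt items index longest_sequence current_sequence
instance (items : List Int) (index : Int) (longest_sequence : Int) (current_sequence : Int) (out : Int) : Decidable (Spec_sequence_counter items index longest_sequence current_sequence out) := by unfold Spec_sequence_counter; infer_instance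

-- ===== CLAIM (what is proved, stated in full; the proofs are below) =====
def Claim_equal_sequence_counter : Prop := ∀ (items : List Int) (index : Int) (longest_sequence : Int) (current_sequence : Int), Dom_sequence_counter items index longest_sequence current_sequence → Pre_sequence_counter items index longest_sequence current_sequence → Spec_sequence_counter items index longest_sequence current_sequence (sequence_counter items index longest_sequence current_sequence)

-- ===== LEMMAS AND PROOFS =====

-- A from a too-large start index returns max(l, c) (IndexError branch)
lemma seq_out_of_range (items : List Int) (i l c : Int)
    (hi : i ≠ 0) (h : ¬ PySem.Raise.InRange items.length i ∨ ¬ PySem.Raise.InRange items.length (i - 1)) :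
    sequence_counter items i l c = max l c := by
  rw [sequence_counter]
  simp only [dif_neg hi]
  rcases h with h | h
  · rw [(PySem.List.pyGet?_eq_none_iff items i).mpr h]
    split
    all_goals simp_all
  · rw [(PySem.List.pyGet?_eq_none_iff items (i - 1)).mpr h]

-- A from a positive start index equals B's loop
lemma seq_eq_loop (items : List Int) :
    ∀ (k : Nat) (i l c : Int), 1 ≤ i → ((items.length : Int) - i).toNat = k →
      sequence_counter items i l c = alt_loop items i l c := by
  intro k
  induction k with
  | zero =>
    intro i l c hi hk
    have hlen : (items.length : Int) ≤ i := by omega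
    rw [seq_out_of_range items i l c (by omega)
      (Or.inl (by unfold PySem.Raise.InRange; omega))]
    unfold alt_loop
    rw [PySem.List.pyRange_one_eq_nil hlen]
    rfl
  | succ k ih =>
    intro i l c hi hk
    have hilt : i < (items.length : Int) := by omega
    have hg1 : PySem.List.pyGet? items (i - 1) = some items[(i - 1).toNat] :=
      PySem.List.pyGet?_eq_some_getElem items (by omega) (by omega)
    have hg2 : PySem.List.pyGet? items i = some items[i.toNat] :=
      PySem.List.pyGet?_eq_some_getElem items (by omega) (by omega)
    have hloop : alt_loop items i l c =
        if alt_match items i then alt_loop items (i + 1) l (c + 1)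
        else alt_loop items (i + 1) (max l c) 1 := by
      unfold alt_loop
      rw [PySem.List.pyRange_one_cons hilt]
      simp only [List.foldl_cons]
      split_ifs with hm <;> simp
    rw [sequence_counter]
    simp only [dif_neg (by omega : ¬ i = 0)]
    rw [hg1, hg2, hloop]
    split
    · rename_i last cur heq1 heq2
      injection heq1 with e1
      injection heq2 with e2
      have hmatch : digit_checker last cur = alt_match items i := by
        unfold digit_checker alt_match
        rw [← e1, ← e2, List.getD_eq_getElem items 0 (by omega : (i - 1).toNat < items.length),
          List.getD_eq_getElem items 0 (by omega : i.toNat < items.length)]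
      rw [hmatch]
      split_ifs with hm
      · exact ih (i + 1) l (c + 1) (by omega) (by omega)
      · exact ih (i + 1) (max l c) 1 (by omega) (by omega)
    · rename_i hcontra
      exact (hcontra _ _ rfl rfl).elim

-- ===== VERDICT (by name: the statement is the Claim_ definition above) =====
theorem sequence_counter_spec : Claim_equal_sequence_counter := by
  intro items index l c _ hpre
  unfold Spec_sequence_counter sequence_counter_alt
  by_cases h0 : index = 0
  · rw [if_pos h0]
    subst h0
    rw [sequence_counter]
    exact seq_eq_loop items ((items.length : Int) - 1).toNat 1 1 1 (by omega) rfl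
  · rw [if_neg h0]
    exact seq_eq_loop items ((items.length : Int) - index).toNat index l c
      (by unfold Pre_sequence_counter at hpre; omega) rfl
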